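-- pv_equiv track=rewrite | github.com/LukeCampbell3/NBA-Analytics | Player-Predictor/scripts/validate_board_objective_mode.py | _normalize_player_key
-- ===== SOURCE A (Python) =====
-- import unicodedata
--
-- def _normalize_player_key(value: str) -> str:
--     text = str(value or "").strip()
--     if not text:
--         return ""
--     text = text.replace(" ", "_")
--     for old, new in [(".", ""), ("'", ""), ("`", ""), ("’", ""), (",", ""), ("/", "-"), ("\\", "-"), (":", "")]:
--         text = text.replace(old, new)
--     text = "_".join(part for part in text.split("_") if part)
--     folded = unicodedata.normalize("NFKD", text)
--     ascii_text = "".join(ch for ch in folded if not unicodedata.combining(ch))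
--     return ascii_text
-- ===== SOURCE B (Python) =====
-- import unicodedata
--
-- def _normalize_player_key(value: str) -> str:
--     text = str(value or "").strip()
--     mapping = {" ": "_", "/": "-", "\\": "-"}
--     out = []
--     pending = False
--     for ch in text:
--         ch = mapping.get(ch, ch)
--         if ch in ".'`\u2019,:":
--             continue
--         if ch == "_":
--             pending = bool(out)
--             continue
--         if pending:
--             out.append("_")
--             pending = False
--         out.append(ch)
--     folded = unicodedata.normalize("NFKD", "".join(out))
--     return "".join(c for c in folded if not unicodedata.combining(c))
-- ===== Notes on version B (the rewrite author's own statement) =====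
-- stated objective: alternative
-- what changed: A's nine sequential whole-string replace passes followed by a split/filter/join collapse of separator underscores are fused into a single left-to-right scan that maps or deletes each character via a small table and collapses/drops separator underscores on the fly with a pending flag.
import Mathlib
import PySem

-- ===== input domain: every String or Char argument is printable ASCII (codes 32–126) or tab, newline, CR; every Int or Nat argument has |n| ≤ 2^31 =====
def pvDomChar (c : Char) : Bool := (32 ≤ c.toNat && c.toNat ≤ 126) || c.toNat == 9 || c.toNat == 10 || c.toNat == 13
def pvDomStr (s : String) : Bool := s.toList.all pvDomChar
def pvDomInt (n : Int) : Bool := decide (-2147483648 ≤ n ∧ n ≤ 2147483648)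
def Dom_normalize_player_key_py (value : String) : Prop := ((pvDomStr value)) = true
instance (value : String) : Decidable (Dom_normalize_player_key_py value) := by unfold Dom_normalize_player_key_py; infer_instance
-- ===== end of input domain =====

-- B replaces A's nine sequential str.replace passes plus the split/join underscore collapse by one fused
-- left-to-right scan that maps/deletes each character and collapses separator underscores on the fly
-- (objective: alternative single-pass algorithm).

-- shared helpers for the unicodedata calls both Pythons make, exact on the ASCII domain Dom:
-- unicodedata.normalize("NFKD", s) is the identity on ASCII strings
def nfkdAscii (cs : List Char) : List Char := cs
-- unicodedata.combining(ch) is 0 (falsy) for every ASCII character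
def combiningAscii (_c : Char) : Bool := false

-- ===== PORT A =====
def normalize_player_key_py (value : String) : String :=
  -- str(value or "") = value (a str is falsy exactly when it is "", and str is the identity on str)
  let text := PySem.Chars.strip value.toList
  if text.isEmpty then "" else
  let text := PySem.Chars.replace text [' '] ['_']
  let text := [('.', "".toList), ('\'', "".toList), ('`', "".toList), ('’', "".toList), (',', "".toList),
               ('/', "-".toList), ('\\', "-".toList), (':', "".toList)].foldl
    (fun t p => PySem.Chars.replace t [p.1] p.2) text
  let text := PySem.Chars.join ['_'] ((PySem.Chars.splitOn text ['_']).filter (fun part => !part.isEmpty))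
  let folded := nfkdAscii text
  String.ofList (folded.filter (fun ch => !combiningAscii ch))

-- ===== PORT B =====
def bMapping : PySem.Dict Char Char :=
  ((PySem.Dict.empty.insert ' ' '_').insert '/' '-').insert '\\' '-'

def bStep (s : List Char × Bool) (ch : Char) : List Char × Bool :=
  let ch := bMapping.getD ch ch
  if PySem.Chars.isIn [ch] ".'`’,:".toList then s
  else if ch = '_' then (s.1, !s.1.isEmpty)
  else ((if s.2 then s.1 ++ ['_'] else s.1) ++ [ch], false)

def normalize_player_key_py_alt (value : String) : String :=
  let text := PySem.Chars.strip value.toList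
  let out := text.foldl bStep ([], false)
  let folded := nfkdAscii out.1
  String.ofList (folded.filter (fun c => !combiningAscii c))

-- ===== PRECONDITION & SPEC =====
def Spec_normalize_player_key_py (value : String) (out : String) : Prop := out = normalize_player_key_py_alt value
instance (value : String) (out : String) : Decidable (Spec_normalize_player_key_py value out) := by unfold Spec_normalize_player_key_py; infer_instance

-- ===== CLAIM (what is proved, stated in full; the proofs are below) =====
def Claim_equal_normalize_player_key_py : Prop := ∀ (value : String), Dom_normalize_player_key_py value → Spec_normalize_player_key_py value (normalize_player_key_py value)

-- ===== LEMMAS AND PROOFS =====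

-- the per-character action all nine of A's replaces amount to
def mapChar (c : Char) : Option Char :=
  if c = ' ' then some '_'
  else if c = '.' ∨ c = '\'' ∨ c = '`' ∨ c = '’' ∨ c = ',' ∨ c = ':' then none
  else if c = '/' ∨ c = '\\' then some '-'
  else some c

-- the pure collapsing step on already-mapped characters
def colStep (s : List Char × Bool) (c : Char) : List Char × Bool :=
  if c = '_' then (s.1, !s.1.isEmpty)
  else ((if s.2 then s.1 ++ ['_'] else s.1) ++ [c], false)

-- reference collapse: what the scan appends after a non-empty output with pending flag pend
def emitC : Bool → List Char → List Char
  | _, [] => []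
  | pend, c :: t => if c = '_' then emitC true t
      else if pend then '_' :: c :: emitC false t else c :: emitC false t

-- reference collapse from an empty output (leading separators dropped)
def leadC : List Char → List Char
  | [] => []
  | c :: t => if c = '_' then leadC t else c :: emitC false t

-- splitOn with separator '_', in direct recursive form
def splA (cur : List Char) : List Char → List (List Char)
  | [] => [cur]
  | c :: t => if c = '_' then cur :: splA [] t else splA (cur ++ [c]) t

theorem isIn_singleton (c : Char) (l : List Char) : PySem.Chars.isIn [c] l = l.contains c :=
  Bool.eq_iff_iff.mpr (by simp [PySem.Chars.isIn_iff_infix, List.singleton_infix_iff])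

theorem replace_go_single (a : Char) (new : List Char) (l : List Char) :
    ∀ (fuel : Nat) (acc : List Char), l.length ≤ fuel →
      PySem.Chars.replace.go [a] new fuel l acc
        = acc.reverse ++ l.flatMap (fun c => if c = a then new else [c]) := by
  induction l with
  | nil =>
      intro fuel acc _
      cases fuel <;> simp [PySem.Chars.replace.go]
  | cons c t ih =>
      intro fuel acc h
      cases fuel with
      | zero => simp at h
      | succ k =>
        have hk : t.length ≤ k := by simpa using Nat.succ_le_succ_iff.mp (by simpa using h)
        by_cases hc : c = a
        · subst hc
          simp [PySem.Chars.replace.go, List.isPrefixOf, ih k _ hk]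
        · simp [PySem.Chars.replace.go, List.isPrefixOf, hc, Ne.symm hc, ih k _ hk]

theorem replace_single (a : Char) (new : List Char) (s : List Char) :
    PySem.Chars.replace s [a] new = s.flatMap (fun c => if c = a then new else [c]) := by
  simp [PySem.Chars.replace, replace_go_single a new s s.length [] le_rfl]

theorem splitOn_go_eq (l : List Char) :
    ∀ (fuel : Nat) (cur : List Char) (acc : List (List Char)), l.length + 1 ≤ fuel →
      PySem.Chars.splitOn.go ['_'] fuel l cur acc = acc.reverse ++ splA cur.reverse l := by
  induction l with
  | nil =>
      intro fuel cur acc h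
      cases fuel with
      | zero => simp at h
      | succ k => simp [PySem.Chars.splitOn.go, splA]
  | cons c t ih =>
      intro fuel cur acc h
      cases fuel with
      | zero => simp at h
      | succ k =>
        have hk : t.length + 1 ≤ k := by simpa using Nat.succ_le_succ_iff.mp (by simpa using h)
        by_cases hc : c = '_'
        · subst hc
          simp [PySem.Chars.splitOn.go, List.isPrefixOf, ih k [] _ hk, splA]
        · simp [PySem.Chars.splitOn.go, List.isPrefixOf, hc, Ne.symm hc, ih k (c :: cur) _ hk, splA]

theorem splitOn_single (s : List Char) :
    PySem.Chars.splitOn s ['_'] = splA [] s := by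
  simpa using splitOn_go_eq s (s.length + 1) [] [] le_rfl

-- the chain of nine single-character replaces is one character-wise flatMap of mapChar
theorem chain_eq_flatMap (s : List Char) :
    ([('.', "".toList), ('\'', "".toList), ('`', "".toList), ('’', "".toList), (',', "".toList),
      ('/', "-".toList), ('\\', "-".toList), (':', "".toList)].foldl
        (fun t p => PySem.Chars.replace t [p.1] p.2)
        (PySem.Chars.replace s [' '] ['_']))
      = s.flatMap (fun c => (mapChar c).toList) := by
  simp only [List.foldl_cons, List.foldl_nil, replace_single, List.flatMap_assoc]
  congr 1
  funext c
  by_cases h1 : c = ' '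
  · subst h1; simp [mapChar]
  · by_cases h2 : c = '.'
    · subst h2; simp [mapChar]
    · by_cases h3 : c = '\''
      · subst h3; simp [mapChar]
      · by_cases h4 : c = '`'
        · subst h4; simp [mapChar]
        · by_cases h5 : c = '’'
          · subst h5; simp [mapChar]
          · by_cases h6 : c = ','
            · subst h6; simp [mapChar]
            · by_cases h7 : c = '/'
              · subst h7; simp [mapChar]
              · by_cases h8 : c = '\\'
                · subst h8; simp [mapChar]
                · by_cases h9 : c = ':'
                  · subst h9; simp [mapChar]
                  · simp [mapChar, h1, h2, h3, h4, h5, h6, h7, h8, h9]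

-- evaluating B's mapping dictionary
theorem getD_sp : bMapping.getD ' ' ' ' = '_' := by decide
theorem getD_sl : bMapping.getD '/' '/' = '-' := by decide
theorem getD_bs : bMapping.getD '\\' '\\' = '-' := by decide
theorem getD_other (c : Char) (h1 : c ≠ ' ') (h2 : c ≠ '/') (h3 : c ≠ '\\') :
    bMapping.getD c c = c := by
  simp [bMapping, PySem.Dict.getD_insert, h1, h2, h3]

-- B's raw step is the collapse step applied to the mapped character (or a no-op on a deleted one)
theorem bStep_eq (s : List Char × Bool) (ch : Char) :
    bStep s ch = ((mapChar ch).toList).foldl colStep s := by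
  by_cases h1 : ch = ' '
  · subst h1; simp [bStep, getD_sp, mapChar, colStep, isIn_singleton]
  · by_cases h2 : ch = '.'
    · subst h2; simp [bStep, getD_other '.' (by decide) (by decide) (by decide), mapChar, isIn_singleton]
    · by_cases h3 : ch = '\''
      · subst h3; simp [bStep, getD_other '\'' (by decide) (by decide) (by decide), mapChar, isIn_singleton]
      · by_cases h4 : ch = '`'
        · subst h4; simp [bStep, getD_other '`' (by decide) (by decide) (by decide), mapChar, isIn_singleton]
        · by_cases h5 : ch = '’'
          · subst h5; simp [bStep, getD_other '’' (by decide) (by decide) (by decide), mapChar, isIn_singleton]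
          · by_cases h6 : ch = ','
            · subst h6; simp [bStep, getD_other ',' (by decide) (by decide) (by decide), mapChar, isIn_singleton]
            · by_cases h7 : ch = '/'
              · subst h7; simp [bStep, getD_sl, mapChar, colStep, isIn_singleton]
              · by_cases h8 : ch = '\\'
                · subst h8; simp [bStep, getD_bs, mapChar, colStep, isIn_singleton]
                · by_cases h9 : ch = ':'
                  · subst h9; simp [bStep, getD_other ':' (by decide) (by decide) (by decide), mapChar, isIn_singleton]
                  · simp only [bStep, getD_other ch h1 h7 h8]
                    rw [if_neg (by simp [isIn_singleton, h2, h3, h4, h5, h6, h9])]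
                    simp [mapChar, colStep, h1, h2, h3, h4, h5, h6, h7, h8, h9]

theorem splA_us (cur t) : splA cur ('_' :: t) = cur :: splA [] t := by simp [splA]
theorem splA_ch {c : Char} (hc : c ≠ '_') (cur t) : splA cur (c :: t) = splA (cur ++ [c]) t := by
  simp [splA, hc]
theorem emitC_us (pend t) : emitC pend ('_' :: t) = emitC true t := by simp [emitC]
theorem leadC_us (t) : leadC ('_' :: t) = leadC t := by simp [leadC]

-- emitC with pending = true, expressed through leadC
theorem emit_true_eq (t : List Char) :
    emitC true t = if leadC t = [] then [] else '_' :: leadC t := by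
  induction t with
  | nil => simp [emitC, leadC]
  | cons c t ih =>
      by_cases hc : c = '_'
      · subst hc; simpa [emitC, leadC] using ih
      · simp [emitC, leadC, hc]

-- a split that started inside a non-empty part never filters down to nothing
theorem filter_splA_ne (t : List Char) :
    ∀ cur, cur ≠ [] → (splA cur t).filter (fun part => !part.isEmpty) ≠ [] := by
  induction t with
  | nil => intro cur h; simp [splA, h]
  | cons c t ih =>
      intro cur h
      by_cases hc : c = '_'
      · subst hc; simp [splA, h]
      · simp only [splA, if_neg hc]
        exact ih (cur ++ [c]) (by simp)

theorem filter_splA_nil_iff (t : List Char) :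
    ((splA [] t).filter (fun part => !part.isEmpty) = []) ↔ leadC t = [] := by
  induction t with
  | nil => simp [splA, leadC]
  | cons c t ih =>
      by_cases hc : c = '_'
      · subst hc; simpa [splA, leadC] using ih
      · simp only [splA, leadC, if_neg hc]
        constructor
        · intro h; exact absurd h (filter_splA_ne t [c] (by simp))
        · intro h; simp at h

-- A's split/filter/join collapse equals the reference collapse
theorem join_splA (m : List Char) :
    ∀ cur, PySem.Chars.join ['_'] ((splA cur m).filter (fun part => !part.isEmpty))
      = if cur = [] then leadC m else cur ++ emitC false m := by
  induction m with
  | nil =>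
      intro cur
      by_cases h : cur = [] <;>
        simp [splA, leadC, emitC, h, PySem.Chars.join_nil, PySem.Chars.join_singleton]
  | cons c t ih =>
      intro cur
      by_cases hc : c = '_'
      · subst hc
        have hj := ih []
        rw [if_pos rfl] at hj
        by_cases h : cur = []
        · subst h
          rw [splA_us, if_pos rfl, leadC_us, ← hj]
          simp
        · rw [splA_us, if_neg h, emitC_us, emit_true_eq,
              List.filter_cons_of_pos (by simp [h])]
          by_cases hl : leadC t = []
          · rw [(filter_splA_nil_iff t).mpr hl, PySem.Chars.join_singleton, if_pos hl]
            simp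
          · obtain ⟨p, ps, hps⟩ :=
              List.exists_cons_of_ne_nil (fun hx => hl ((filter_splA_nil_iff t).mp hx))
            rw [hps, PySem.Chars.join_cons_cons, ← hps, hj, if_neg hl]
            simp
      · rw [splA_ch hc, ih (cur ++ [c]), if_neg (by simp : ¬ cur ++ [c] = [])]
        by_cases h : cur = []
        · subst h; simp [leadC, hc]
        · rw [if_neg h]; simp [emitC, hc]

-- the fused scan from a non-empty output
theorem foldl_colStep_ne (m : List Char) :
    ∀ out pend, out ≠ [] → (m.foldl colStep (out, pend)).1 = out ++ emitC pend m := by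
  induction m with
  | nil => intro out pend h; simp [emitC]
  | cons c t ih =>
      intro out pend h
      by_cases hc : c = '_'
      · subst hc
        have hne : out.isEmpty = false := by simp [h]
        simp [colStep, emitC, hne, ih out true h]
      · have h2 := ih ((if pend then out ++ ['_'] else out) ++ [c]) false
          (by by_cases hp : pend <;> simp [hp])
        simp only [List.foldl_cons, colStep, if_neg hc] at h2 ⊢
        rw [h2]
        by_cases hp : pend <;> simp [emitC, hc, hp]

-- the fused scan from scratch
theorem foldl_colStep_nil (m : List Char) :
    (m.foldl colStep ([], false)).1 = leadC m := by
  induction m with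
  | nil => simp [leadC]
  | cons c t ih =>
      by_cases hc : c = '_'
      · subst hc; simpa [colStep, leadC] using ih
      · simp [colStep, hc, leadC, foldl_colStep_ne t [c] false (by simp)]

-- B's whole fold, through the mapped character stream
theorem foldl_bStep_eq (cs : List Char) :
    (cs.foldl bStep ([], false)).1 = leadC (cs.flatMap (fun c => (mapChar c).toList)) := by
  have hb : bStep = fun s x => ((mapChar x).toList).foldl colStep s := by
    funext s x; exact bStep_eq s x
  rw [hb, ← List.foldl_flatMap, foldl_colStep_nil]

-- ===== VERDICT (by name: the statement is the Claim_ definition above) =====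
theorem normalize_player_key_py_spec : Claim_equal_normalize_player_key_py := by
  unfold Claim_equal_normalize_player_key_py
  intro value _
  unfold Spec_normalize_player_key_py normalize_player_key_py normalize_player_key_py_alt
  simp only [nfkdAscii, combiningAscii, Bool.not_false, List.filter_true]
  by_cases h : (PySem.Chars.strip value.toList).isEmpty
  · have h' : PySem.Chars.strip value.toList = [] := by simpa using h
    simp [h']
  · rw [if_neg h, chain_eq_flatMap, splitOn_single, foldl_bStep_eq, join_splA, if_pos rfl]
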